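-- pv_equiv track=rewrite | github.com/smy37/Daily_Coding | classify_by_algorithm/bfs_getItem.py | insert_start
-- ===== SOURCE A (Python) =====
-- def insert_start(temp_true_dot, characterX, characterY):
--     c_vertical_list1 = []
--     c_vertical_list2 = []
--     c_horizontal_list1 = []
--     c_horizontal_list2 = []
--     for i in range(len(temp_true_dot)):
--         if temp_true_dot[i][0] == characterX:
--             if temp_true_dot[i][1] > characterY:
--                 c_vertical_list1.append(temp_true_dot[i])
--             elif temp_true_dot[i][1] < characterY:
--                 c_vertical_list2.append(temp_true_dot[i])
--         if temp_true_dot[i][1] == characterY: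
--             if temp_true_dot[i][0] > characterX:
--                 c_horizontal_list1.append(temp_true_dot[i])
--             elif temp_true_dot[i][0] < characterX:
--                 c_horizontal_list2.append(temp_true_dot[i])
--     c_vertical_list1 = sorted(c_vertical_list1, key=lambda x: x[1])
--     c_vertical_list2 = sorted(c_vertical_list2, key=lambda x: x[1], reverse=True)
--     c_horizontal_list1 = sorted(c_horizontal_list1, key=lambda x: x[0])
--     c_horizontal_list2 = sorted(c_horizontal_list2, key=lambda x: x[0], reverse=True)
--
--     cri1, cri2 = -1, -1
--     if len(c_vertical_list1) >= 1 and len(c_vertical_list2) >= 1: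
--         cri1 = temp_true_dot.index(c_vertical_list1[0])
--         cri2 = temp_true_dot.index(c_vertical_list2[0])
--
--     elif len(c_horizontal_list1) >= 1 and len(c_horizontal_list2) >= 1:
--         cri1 = temp_true_dot.index(c_horizontal_list1[0])
--         cri2 = temp_true_dot.index(c_horizontal_list2[0])
--
--     real_cri = min(cri1, cri2)
--     real_cri2 = max(cri1, cri2)
--     if real_cri == 0 and real_cri2 == len(temp_true_dot)-1:
--         temp_true_dot = [[characterX, characterY]] + temp_true_dot
--     else:
--         temp_true_dot = temp_true_dot[:real_cri + 1] + [[characterX, characterY]] + temp_true_dot[real_cri + 1:]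
--
--     return temp_true_dot
-- ===== SOURCE B (Python) =====
-- def insert_start(temp_true_dot, characterX, characterY):
--     # Single enumerated pass keeping, per direction, the (index, coordinate) of
--     # the nearest candidate seen so far; no candidate lists, no sorting, no .index().
--     up = down = right = left = None  # each: (index, coordinate) or None
--     for i, p in enumerate(temp_true_dot):
--         if p[0] == characterX:
--             if p[1] > characterY and (up is None or p[1] < up[1]):
--                 up = (i, p[1])
--             elif p[1] < characterY and (down is None or p[1] > down[1]):
--                 down = (i, p[1])
--         if p[1] == characterY:
--             if p[0] > characterX and (right is None or p[0] < right[1]):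
--                 right = (i, p[0])
--             elif p[0] < characterX and (left is None or p[0] > left[1]):
--                 left = (i, p[0])
--     if up is not None and down is not None:
--         lo, hi = min(up[0], down[0]), max(up[0], down[0])
--     elif right is not None and left is not None:
--         lo, hi = min(right[0], left[0]), max(right[0], left[0])
--     else:
--         lo = hi = -1
--     pos = 0 if lo == 0 and hi == len(temp_true_dot) - 1 else lo + 1
--     return temp_true_dot[:pos] + [[characterX, characterY]] + temp_true_dot[pos:]
-- ===== Notes on version B (the rewrite author's own statement) =====
-- stated objective: alternative
-- what changed: Replaces A's four filtered candidate lists, four stable sorts and .index() lookups of the sorted heads by one enumerated pass that keeps the (index, coordinate) of the running nearest candidate per direction, so the insertion position falls out directly with no sort and no list search.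
-- outside the precondition, e.g. on insert_start([[1]], 0, 0): A raises IndexError, B raises IndexError
import Mathlib
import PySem

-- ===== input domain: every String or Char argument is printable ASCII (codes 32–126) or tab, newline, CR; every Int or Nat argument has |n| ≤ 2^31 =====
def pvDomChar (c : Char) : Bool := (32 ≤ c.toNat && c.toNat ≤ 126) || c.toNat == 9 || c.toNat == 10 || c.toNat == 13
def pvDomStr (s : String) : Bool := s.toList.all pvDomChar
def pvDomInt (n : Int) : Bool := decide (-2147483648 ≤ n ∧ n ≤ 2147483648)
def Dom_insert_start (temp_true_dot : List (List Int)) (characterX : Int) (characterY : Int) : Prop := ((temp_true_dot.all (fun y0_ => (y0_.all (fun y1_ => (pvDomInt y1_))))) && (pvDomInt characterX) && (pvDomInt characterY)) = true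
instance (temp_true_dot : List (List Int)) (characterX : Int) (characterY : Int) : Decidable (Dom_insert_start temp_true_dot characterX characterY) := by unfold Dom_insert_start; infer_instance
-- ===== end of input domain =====

-- B replaces A's four filtered candidate lists + four sorts + .index() lookups of the
-- sorted heads by one enumerated pass keeping the (index, coordinate) of the running
-- nearest candidate per direction (alternative algorithm, not measured faster).

-- ===== PORT A =====
-- loop body of A's 'for i in range(len(temp_true_dot))'
def pvABody (characterX characterY : Int)
    (acc : List (List Int) × List (List Int) × List (List Int) × List (List Int))
    (p : List Int) :
    List (List Int) × List (List Int) × List (List Int) × List (List Int) :=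
  let p0 := PySem.List.pyGetD p 0 0
  let p1 := PySem.List.pyGetD p 1 0
  let acc :=
    if p0 = characterX then
      (if p1 > characterY then (acc.1 ++ [p], acc.2.1, acc.2.2.1, acc.2.2.2)
       else if p1 < characterY then (acc.1, acc.2.1 ++ [p], acc.2.2.1, acc.2.2.2)
       else acc)
    else acc
  if p1 = characterY then
    (if p0 > characterX then (acc.1, acc.2.1, acc.2.2.1 ++ [p], acc.2.2.2)
     else if p0 < characterX then (acc.1, acc.2.1, acc.2.2.1, acc.2.2.2 ++ [p])
     else acc)
  else acc

def insert_start (temp_true_dot : List (List Int)) (characterX : Int) (characterY : Int) : List (List Int) :=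
  let st := (PySem.List.pyRange 0 (PySem.List.len temp_true_dot)).foldl
    (fun acc i => pvABody characterX characterY acc (PySem.List.pyGetD temp_true_dot i []))
    ([], [], [], [])
  let v1 := PySem.List.sorted st.1 (fun p => PySem.List.pyGetD p 1 0)
  let v2 := PySem.List.sorted st.2.1 (fun p => PySem.List.pyGetD p 1 0) true
  let h1 := PySem.List.sorted st.2.2.1 (fun p => PySem.List.pyGetD p 0 0)
  let h2 := PySem.List.sorted st.2.2.2 (fun p => PySem.List.pyGetD p 0 0) true
  let cri : Int × Int :=
    if v1.length ≥ 1 ∧ v2.length ≥ 1 then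
      ((((PySem.List.index? temp_true_dot (PySem.List.pyGetD v1 0 [])).getD 0 : Nat) : Int),
       (((PySem.List.index? temp_true_dot (PySem.List.pyGetD v2 0 [])).getD 0 : Nat) : Int))
    else if h1.length ≥ 1 ∧ h2.length ≥ 1 then
      ((((PySem.List.index? temp_true_dot (PySem.List.pyGetD h1 0 [])).getD 0 : Nat) : Int),
       (((PySem.List.index? temp_true_dot (PySem.List.pyGetD h2 0 [])).getD 0 : Nat) : Int))
    else (-1, -1)
  let real_cri := min cri.1 cri.2
  let real_cri2 := max cri.1 cri.2
  if real_cri = 0 ∧ real_cri2 = PySem.List.len temp_true_dot - 1 then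
    [[characterX, characterY]] ++ temp_true_dot
  else
    PySem.List.slice temp_true_dot none (some (real_cri + 1)) ++ [[characterX, characterY]] ++
      PySem.List.slice temp_true_dot (some (real_cri + 1)) none

-- ===== PORT B =====
-- loop body of B's 'for i, p in enumerate(temp_true_dot)': each direction keeps an
-- optional (index, coordinate) pair of the nearest candidate seen so far
def pvBStep (characterX characterY : Int)
    (acc : Option (Int × Int) × Option (Int × Int) × Option (Int × Int) × Option (Int × Int))
    (ip : Int × List Int) :
    Option (Int × Int) × Option (Int × Int) × Option (Int × Int) × Option (Int × Int) :=
  let p0 := PySem.List.pyGetD ip.2 0 0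
  let p1 := PySem.List.pyGetD ip.2 1 0
  let acc :=
    if p0 = characterX then
      (if p1 > characterY ∧ (acc.1.all fun s => decide (p1 < s.2)) then
         (some (ip.1, p1), acc.2.1, acc.2.2.1, acc.2.2.2)
       else if p1 < characterY ∧ (acc.2.1.all fun s => decide (p1 > s.2)) then
         (acc.1, some (ip.1, p1), acc.2.2.1, acc.2.2.2)
       else acc)
    else acc
  if p1 = characterY then
    (if p0 > characterX ∧ (acc.2.2.1.all fun s => decide (p0 < s.2)) then
       (acc.1, acc.2.1, some (ip.1, p0), acc.2.2.2)
     else if p0 < characterX ∧ (acc.2.2.2.all fun s => decide (p0 > s.2)) then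
       (acc.1, acc.2.1, acc.2.2.1, some (ip.1, p0))
     else acc)
  else acc

def insert_start_alt (temp_true_dot : List (List Int)) (characterX : Int) (characterY : Int) : List (List Int) :=
  let st := (PySem.List.enumerate temp_true_dot).foldl (pvBStep characterX characterY)
    (none, none, none, none)
  let lohi : Int × Int :=
    if st.1.isSome ∧ st.2.1.isSome then
      (min (st.1.getD (0, 0)).1 (st.2.1.getD (0, 0)).1,
       max (st.1.getD (0, 0)).1 (st.2.1.getD (0, 0)).1)
    else if st.2.2.1.isSome ∧ st.2.2.2.isSome then
      (min (st.2.2.1.getD (0, 0)).1 (st.2.2.2.getD (0, 0)).1,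
       max (st.2.2.1.getD (0, 0)).1 (st.2.2.2.getD (0, 0)).1)
    else (-1, -1)
  let pos : Int := if lohi.1 = 0 ∧ lohi.2 = PySem.List.len temp_true_dot - 1 then 0 else lohi.1 + 1
  PySem.List.slice temp_true_dot none (some pos) ++ [[characterX, characterY]] ++
    PySem.List.slice temp_true_dot (some pos) none

-- ===== PRECONDITION & SPEC =====
-- Pre_ excludes exactly the inputs on which Python A raises IndexError: a row with
-- fewer than two coordinates.
def Pre_insert_start (temp_true_dot : List (List Int)) (characterX : Int) (characterY : Int) : Prop :=
  ∀ p ∈ temp_true_dot, 2 ≤ p.length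
instance (temp_true_dot : List (List Int)) (characterX : Int) (characterY : Int) : Decidable (Pre_insert_start temp_true_dot characterX characterY) := by unfold Pre_insert_start; infer_instance
def pvWitness_insert_start : List (List Int) × Int × Int := ([[0, 2], [0, -1], [3, 3]], 0, 0)
def Spec_insert_start (temp_true_dot : List (List Int)) (characterX : Int) (characterY : Int) (out : List (List Int)) : Prop := out = insert_start_alt temp_true_dot characterX characterY
instance (temp_true_dot : List (List Int)) (characterX : Int) (characterY : Int) (out : List (List Int)) : Decidable (Spec_insert_start temp_true_dot characterX characterY out) := by unfold Spec_insert_start; infer_instance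

-- ===== CLAIM (what is proved, stated in full; the proofs are below) =====
def Claim_equal_insert_start : Prop := ∀ (temp_true_dot : List (List Int)) (characterX : Int) (characterY : Int), Dom_insert_start temp_true_dot characterX characterY → Pre_insert_start temp_true_dot characterX characterY → Spec_insert_start temp_true_dot characterX characterY (insert_start temp_true_dot characterX characterY)

-- ===== LEMMAS AND PROOFS =====

-- running best VALUE: the head of a stable insertion sort, scanned from the left
def pvBest {α : Type} (before : α → α → Bool) (st : Option α) (y : α) : Option α :=
  match st with
  | none => some y
  | some h => if before y h then some y else some h

theorem pvInsertBy_cons {α : Type} (before : α → α → Bool) (x y : α) (ys : List α) :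
    PySem.List.insertBy before x (y :: ys) =
      if before x y then x :: y :: ys else y :: PySem.List.insertBy before x ys := rfl

theorem pvHead_insertBy {α : Type} (before : α → α → Bool) (x : α) (ys : List α) :
    (PySem.List.insertBy before x ys).head? = pvBest before ys.head? x := by
  cases ys with
  | nil => rfl
  | cons y ys =>
      rw [pvInsertBy_cons]
      by_cases h : before x y = true <;> simp [pvBest, h]

theorem pvHead_foldl_insertBy {α : Type} (before : α → α → Bool) (l : List α) (acc : List α) :
    (l.foldl (fun acc x => PySem.List.insertBy before x acc) acc).head? =
      l.foldl (pvBest before) acc.head? := by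
  induction l generalizing acc with
  | nil => rfl
  | cons x t ih => simp only [List.foldl_cons, ih, pvHead_insertBy]

theorem pvHead_sorted {α : Type} (key : α → Int) (xs : List α) :
    (PySem.List.sorted xs key).head? =
      xs.foldl (pvBest (fun a b => decide (key a < key b))) none := by
  rw [PySem.List.sorted_eq_foldl_insertBy, pvHead_foldl_insertBy]; rfl

theorem pvHead_sorted_rev {α : Type} (key : α → Int) (xs : List α) :
    (PySem.List.sorted xs key true).head? =
      xs.foldl (pvBest (fun a b => decide (key b < key a))) none := by
  rw [PySem.List.sorted_rev_eq_foldl_insertBy, pvHead_foldl_insertBy]; rfl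

theorem pvPyGetD_zero {α : Type} (xs : List α) (d : α) :
    PySem.List.pyGetD xs 0 d = xs.head?.getD d := by
  cases xs <;> simp [PySem.List.pyGetD, PySem.List.pyGet?, PySem.List.pyIdx?]

-- the four candidate predicates
def pvQ1 (X Y : Int) (p : List Int) : Bool :=
  decide (PySem.List.pyGetD p 0 0 = X ∧ PySem.List.pyGetD p 1 0 > Y)
def pvQ2 (X Y : Int) (p : List Int) : Bool :=
  decide (PySem.List.pyGetD p 0 0 = X ∧ PySem.List.pyGetD p 1 0 < Y)
def pvQ3 (X Y : Int) (p : List Int) : Bool :=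
  decide (PySem.List.pyGetD p 1 0 = Y ∧ PySem.List.pyGetD p 0 0 > X)
def pvQ4 (X Y : Int) (p : List Int) : Bool :=
  decide (PySem.List.pyGetD p 1 0 = Y ∧ PySem.List.pyGetD p 0 0 < X)

-- A's loop body appends the element to the matching candidate lists
theorem pvABody_eq (X Y : Int)
    (acc : List (List Int) × List (List Int) × List (List Int) × List (List Int))
    (p : List Int) :
    pvABody X Y acc p =
      (acc.1 ++ if pvQ1 X Y p then [p] else [],
       acc.2.1 ++ if pvQ2 X Y p then [p] else [],
       acc.2.2.1 ++ if pvQ3 X Y p then [p] else [],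
       acc.2.2.2 ++ if pvQ4 X Y p then [p] else []) := by
  obtain ⟨a, b, c, d⟩ := acc
  simp only [pvABody, pvQ1, pvQ2, pvQ3, pvQ4]
  split_ifs <;> simp_all <;> omega

-- A's loop builds the four filtered candidate lists
theorem pvALoop (X Y : Int) (l : List (List Int))
    (acc : List (List Int) × List (List Int) × List (List Int) × List (List Int)) :
    l.foldl (pvABody X Y) acc =
      (acc.1 ++ l.filter (pvQ1 X Y), acc.2.1 ++ l.filter (pvQ2 X Y),
       acc.2.2.1 ++ l.filter (pvQ3 X Y), acc.2.2.2 ++ l.filter (pvQ4 X Y)) := by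
  induction l generalizing acc with
  | nil => simp
  | cons p t ih =>
      simp only [List.foldl_cons, pvABody_eq, ih, List.filter_cons]
      cases hq1 : pvQ1 X Y p <;> cases hq2 : pvQ2 X Y p <;>
        cases hq3 : pvQ3 X Y p <;> cases hq4 : pvQ4 X Y p <;> simp

-- generic single-direction update of B's enumerated pass
def pvUpd (q : List Int → Bool) (key : List Int → Int) (lt : Int → Int → Bool)
    (st : Option (Int × Int)) (ip : Int × List Int) : Option (Int × Int) :=
  if q ip.2 ∧ (st.all fun s => lt (key ip.2) s.2) then some (ip.1, key ip.2) else st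

def pvK1 (p : List Int) : Int := PySem.List.pyGetD p 1 0
def pvK0 (p : List Int) : Int := PySem.List.pyGetD p 0 0
def pvLt (a b : Int) : Bool := decide (a < b)
def pvGt (a b : Int) : Bool := decide (b < a)

-- the four single-direction updates, written with pvBStep's own conditions
def pvU1 (X Y : Int) (st : Option (Int × Int)) (ip : Int × List Int) : Option (Int × Int) :=
  if PySem.List.pyGetD ip.2 0 0 = X then
    (if PySem.List.pyGetD ip.2 1 0 > Y ∧
        (st.all fun s => decide (PySem.List.pyGetD ip.2 1 0 < s.2)) then
       some (ip.1, PySem.List.pyGetD ip.2 1 0)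
     else st)
  else st
def pvU2 (X Y : Int) (st : Option (Int × Int)) (ip : Int × List Int) : Option (Int × Int) :=
  if PySem.List.pyGetD ip.2 0 0 = X then
    (if PySem.List.pyGetD ip.2 1 0 < Y ∧
        (st.all fun s => decide (PySem.List.pyGetD ip.2 1 0 > s.2)) then
       some (ip.1, PySem.List.pyGetD ip.2 1 0)
     else st)
  else st
def pvU3 (X Y : Int) (st : Option (Int × Int)) (ip : Int × List Int) : Option (Int × Int) :=
  if PySem.List.pyGetD ip.2 1 0 = Y then
    (if PySem.List.pyGetD ip.2 0 0 > X ∧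
        (st.all fun s => decide (PySem.List.pyGetD ip.2 0 0 < s.2)) then
       some (ip.1, PySem.List.pyGetD ip.2 0 0)
     else st)
  else st
def pvU4 (X Y : Int) (st : Option (Int × Int)) (ip : Int × List Int) : Option (Int × Int) :=
  if PySem.List.pyGetD ip.2 1 0 = Y then
    (if PySem.List.pyGetD ip.2 0 0 < X ∧
        (st.all fun s => decide (PySem.List.pyGetD ip.2 0 0 > s.2)) then
       some (ip.1, PySem.List.pyGetD ip.2 0 0)
     else st)
  else st

-- B's loop body acts componentwise
set_option maxHeartbeats 2000000 in
theorem pvBStep_eq (X Y : Int)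
    (acc : Option (Int × Int) × Option (Int × Int) × Option (Int × Int) × Option (Int × Int))
    (ip : Int × List Int) :
    pvBStep X Y acc ip =
      (pvU1 X Y acc.1 ip, pvU2 X Y acc.2.1 ip, pvU3 X Y acc.2.2.1 ip, pvU4 X Y acc.2.2.2 ip) := by
  obtain ⟨a, b, c, d⟩ := acc
  simp only [pvBStep, pvU1, pvU2, pvU3, pvU4]
  split_ifs <;> first | rfl | omega

-- each pvU is the generic pvUpd at its direction
theorem pvU1_eq (X Y : Int) (st : Option (Int × Int)) (ip : Int × List Int) :
    pvU1 X Y st ip = pvUpd (pvQ1 X Y) pvK1 pvLt st ip := by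
  by_cases h0 : PySem.List.pyGetD ip.2 0 0 = X <;>
    by_cases hc : PySem.List.pyGetD ip.2 1 0 > Y <;>
      simp [pvU1, pvUpd, pvQ1, pvK1, pvLt, h0, hc] <;> split_ifs <;> first | rfl | exact absurd ‹Option.all _ _ = true› ‹¬_›
theorem pvU2_eq (X Y : Int) (st : Option (Int × Int)) (ip : Int × List Int) :
    pvU2 X Y st ip = pvUpd (pvQ2 X Y) pvK1 pvGt st ip := by
  by_cases h0 : PySem.List.pyGetD ip.2 0 0 = X <;>
    by_cases hc : PySem.List.pyGetD ip.2 1 0 < Y <;>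
      simp [pvU2, pvUpd, pvQ2, pvK1, pvGt, h0, hc] <;> split_ifs <;> first | rfl | exact absurd ‹Option.all _ _ = true› ‹¬_›
theorem pvU3_eq (X Y : Int) (st : Option (Int × Int)) (ip : Int × List Int) :
    pvU3 X Y st ip = pvUpd (pvQ3 X Y) pvK0 pvLt st ip := by
  by_cases h1 : PySem.List.pyGetD ip.2 1 0 = Y <;>
    by_cases hc : PySem.List.pyGetD ip.2 0 0 > X <;>
      simp [pvU3, pvUpd, pvQ3, pvK0, pvLt, h1, hc] <;> split_ifs <;> first | rfl | exact absurd ‹Option.all _ _ = true› ‹¬_›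
theorem pvU4_eq (X Y : Int) (st : Option (Int × Int)) (ip : Int × List Int) :
    pvU4 X Y st ip = pvUpd (pvQ4 X Y) pvK0 pvGt st ip := by
  by_cases h1 : PySem.List.pyGetD ip.2 1 0 = Y <;>
    by_cases hc : PySem.List.pyGetD ip.2 0 0 < X <;>
      simp [pvU4, pvUpd, pvQ4, pvK0, pvGt, h1, hc] <;> split_ifs <;> first | rfl | exact absurd ‹Option.all _ _ = true› ‹¬_›

-- B's loop is four independent running-nearest scans
theorem pvBLoop (X Y : Int) (l : List (Int × List Int))
    (acc : Option (Int × Int) × Option (Int × Int) × Option (Int × Int) × Option (Int × Int)) :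
    l.foldl (pvBStep X Y) acc =
      (l.foldl (pvUpd (pvQ1 X Y) pvK1 pvLt) acc.1, l.foldl (pvUpd (pvQ2 X Y) pvK1 pvGt) acc.2.1,
       l.foldl (pvUpd (pvQ3 X Y) pvK0 pvLt) acc.2.2.1, l.foldl (pvUpd (pvQ4 X Y) pvK0 pvGt) acc.2.2.2) := by
  induction l generalizing acc with
  | nil => simp
  | cons p t ih =>
      simp only [List.foldl_cons, pvBStep_eq, ih, pvU1_eq, pvU2_eq, pvU3_eq, pvU4_eq]

-- the relation tying A's running best value to B's running (index, coordinate) pair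
def pvRel (q : List Int → Bool) (key : List Int → Int) (lt : Int → Int → Bool)
    (l : List (List Int)) : Option (List Int) → Option (Int × Int) → Prop
  | none, none => ∀ p ∈ l, q p = false
  | some b, some s =>
      (∃ j : Nat, PySem.List.index? l b = some j ∧ s.1 = (j : Int)) ∧
        s.2 = key b ∧ q b = true ∧ ∀ p ∈ l, q p = true → lt (key p) (key b) = false
  | _, _ => False

theorem pvRel_none_none (q : List Int → Bool) (key : List Int → Int) (lt : Int → Int → Bool)
    (l : List (List Int)) : pvRel q key lt l none none ↔ ∀ p ∈ l, q p = false := Iff.rfl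
theorem pvRel_some_some (q : List Int → Bool) (key : List Int → Int) (lt : Int → Int → Bool)
    (l : List (List Int)) (b : List Int) (s : Int × Int) :
    pvRel q key lt l (some b) (some s) ↔
      (∃ j : Nat, PySem.List.index? l b = some j ∧ s.1 = (j : Int)) ∧
        s.2 = key b ∧ q b = true ∧ ∀ p ∈ l, q p = true → lt (key p) (key b) = false := Iff.rfl
theorem pvRel_none_some (q : List Int → Bool) (key : List Int → Int) (lt : Int → Int → Bool)
    (l : List (List Int)) (s : Int × Int) : ¬ pvRel q key lt l none (some s) := fun h => h
theorem pvRel_some_none (q : List Int → Bool) (key : List Int → Int) (lt : Int → Int → Bool)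
    (l : List (List Int)) (b : List Int) : ¬ pvRel q key lt l (some b) none := fun h => h

theorem pvEnumerate_singleton {α : Type} (x : α) (s : Int) :
    PySem.List.enumerate [x] s = [(s, x)] := by
  simp [PySem.List.enumerate_cons, PySem.List.enumerate_nil]

-- the core invariant: A's running best over the filtered candidates and B's running
-- nearest (index, coordinate) pair stand in pvRel, for any strict 'better' relation
theorem pvMain (q : List Int → Bool) (key : List Int → Int) (lt : Int → Int → Bool)
    (hirr : ∀ a, lt a a = false)
    (hlt : ∀ a b c, lt a b = true → lt c b = false → lt c a = false)
    (l : List (List Int)) :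
    pvRel q key lt l
      ((l.filter q).foldl (pvBest (fun a b => lt (key a) (key b))) none)
      ((PySem.List.enumerate l).foldl (pvUpd q key lt) none) := by
  induction l using List.reverseRecOn with
  | nil =>
      simp only [List.filter_nil, List.foldl_nil, PySem.List.enumerate_nil]
      intro p hp; simp at hp
  | append_singleton l x ih =>
      rw [List.filter_append, List.foldl_append, PySem.List.enumerate_append,
        List.foldl_append, pvEnumerate_singleton, List.foldl_cons, List.foldl_nil]
      set bv := (l.filter q).foldl (pvBest (fun a b => lt (key a) (key b))) none with hbv
      set bi := (PySem.List.enumerate l).foldl (pvUpd q key lt) none with hbi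
      clear_value bv bi
      by_cases hq : q x = true
      · -- x is a candidate
        cases bv with
        | none =>
            cases bi with
            | none =>
                have hnone : ∀ p ∈ l, q p = false := (pvRel_none_none q key lt l).1 ih
                have hxl : x ∉ l := fun hx => by simp [hnone x hx] at hq
                have hupd : pvUpd q key lt none (0 + (l.length : Int), x) =
                    some (0 + (l.length : Int), key x) := by
                  simp [pvUpd, hq]
                rw [hupd]
                have hbest : List.foldl (pvBest fun a b => lt (key a) (key b)) none
                    (List.filter q [x]) = some x := by
                  simp [List.filter_singleton, hq, pvBest]
                rw [hbest, pvRel_some_some]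
                refine ⟨⟨l.length, PySem.List.index?_append_singleton_self l x hxl,
                  by push_cast; ring⟩, rfl, hq, ?_⟩
                intro p hp hqp
                rcases List.mem_append.1 hp with h | h
                · simp [hnone p h] at hqp
                · simp at h; subst h; exact hirr _
            | some s => exact absurd ih (pvRel_none_some q key lt l s)
        | some b =>
            cases bi with
            | none => exact absurd ih (pvRel_some_none q key lt l b)
            | some s =>
                obtain ⟨⟨j, hj, hs1⟩, hs2, hqb, hmin⟩ := (pvRel_some_some q key lt l b s).1 ih
                have hbl : b ∈ l := (PySem.List.index?_isSome_iff l b).1 (by rw [hj]; rfl)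
                have hbest : List.foldl (pvBest fun a b => lt (key a) (key b)) (some b)
                    (List.filter q [x]) =
                    if lt (key x) (key b) = true then some x else some b := by
                  simp only [List.filter_singleton, hq, cond_true, List.foldl_cons,
                    List.foldl_nil]
                  rfl
                rw [hbest]
                by_cases hc : lt (key x) (key b) = true
                · have hupd : pvUpd q key lt (some s) (0 + (l.length : Int), x) =
                      some (0 + (l.length : Int), key x) := by
                    simp [pvUpd, hq, Option.all_some, hs2, hc]
                  rw [hupd, if_pos hc, pvRel_some_some]
                  have hxl : x ∉ l := fun hx => by
                    have := hmin x hx hq; rw [this] at hc; cases hc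
                  refine ⟨⟨l.length, PySem.List.index?_append_singleton_self l x hxl,
                    by push_cast; ring⟩, rfl, hq, ?_⟩
                  intro p hp hqp
                  rcases List.mem_append.1 hp with h | h
                  · exact hlt (key x) (key b) (key p) hc (hmin p h hqp)
                  · simp at h; subst h; exact hirr _
                · have hcf : lt (key x) (key b) = false := by simpa using hc
                  have hupd : pvUpd q key lt (some s) (0 + (l.length : Int), x) = some s := by
                    simp [pvUpd, hq, Option.all_some, hs2, hcf]
                  rw [hupd, if_neg hc, pvRel_some_some]
                  refine ⟨⟨j, by rw [PySem.List.index?_append_of_mem _ hbl]; exact hj, hs1⟩,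
                    hs2, hqb, ?_⟩
                  intro p hp hqp
                  rcases List.mem_append.1 hp with h | h
                  · exact hmin p h hqp
                  · simp at h; subst h; exact hcf
      · -- x is not a candidate: nothing changes
        have hqx : q x = false := by simpa using hq
        have hbest : List.foldl (pvBest fun a b => lt (key a) (key b)) bv
            (List.filter q [x]) = bv := by
          simp [List.filter_singleton, hqx]
        have hupd : pvUpd q key lt bi (0 + (l.length : Int), x) = bi := by
          simp [pvUpd, hqx]
        rw [hbest, hupd]
        cases bv with
        | none =>
            cases bi with
            | none =>
                have hnone : ∀ p ∈ l, q p = false := (pvRel_none_none q key lt l).1 ih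
                rw [pvRel_none_none]
                intro p hp
                rcases List.mem_append.1 hp with h | h
                · exact hnone p h
                · simp at h; subst h; exact hqx
            | some s => exact absurd ih (pvRel_none_some q key lt l s)
        | some b =>
            cases bi with
            | none => exact absurd ih (pvRel_some_none q key lt l b)
            | some s =>
                obtain ⟨⟨j, hj, hs1⟩, hs2, hqb, hmin⟩ := (pvRel_some_some q key lt l b s).1 ih
                have hbl : b ∈ l := (PySem.List.index?_isSome_iff l b).1 (by rw [hj]; rfl)
                rw [pvRel_some_some]
                refine ⟨⟨j, by rw [PySem.List.index?_append_of_mem _ hbl]; exact hj, hs1⟩,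
                  hs2, hqb, ?_⟩
                intro p hp hqp
                rcases List.mem_append.1 hp with h | h
                · exact hmin p h hqp
                · simp at h; subst h; simp [hqx] at hqp

-- consequences of pvRel used to align A's guards/indices with B's
theorem pvRel_isSome (q : List Int → Bool) (key : List Int → Int) (lt : Int → Int → Bool)
    (l : List (List Int)) (bv : Option (List Int)) (bi : Option (Int × Int))
    (h : pvRel q key lt l bv bi) : bv.isSome = bi.isSome := by
  cases bv <;> cases bi <;> simp_all [pvRel]

theorem pvRel_idx (q : List Int → Bool) (key : List Int → Int) (lt : Int → Int → Bool)
    (l : List (List Int)) (b : List Int) (s : Int × Int)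
    (h : pvRel q key lt l (some b) (some s)) :
    (((PySem.List.index? l b).getD 0 : Nat) : Int) = s.1 := by
  obtain ⟨⟨j, hj, hs1⟩, _⟩ := h
  rw [hj, hs1]
  rfl

theorem pvGuard_iff {α : Type} (xs : List α) : 1 ≤ xs.length ↔ (!xs.isEmpty) = true := by
  cases xs <;> simp

theorem pvFoldl_pvBest_some {α : Type} (before : α → α → Bool) (l : List α) (h : α) :
    ∃ z, l.foldl (pvBest before) (some h) = some z := by
  induction l generalizing h with
  | nil => exact ⟨h, rfl⟩
  | cons x t ih =>
      simp only [List.foldl_cons, pvBest]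
      by_cases hb : before x h = true <;> simp [hb] <;> exact ih _

theorem pvIsSome_foldl_pvBest {α : Type} (before : α → α → Bool) (l : List α) :
    (l.foldl (pvBest before) none).isSome = !l.isEmpty := by
  cases l with
  | nil => rfl
  | cons x t =>
      simp only [List.foldl_cons, List.isEmpty_cons]
      obtain ⟨z, hz⟩ := pvFoldl_pvBest_some before t x
      simp [pvBest, hz]

theorem pvFinal (l : List (List Int)) (X Y : Int) (cri : Int × Int) :
    (if min cri.1 cri.2 = 0 ∧ max cri.1 cri.2 = PySem.List.len l - 1 then
       [[X, Y]] ++ l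
     else
       PySem.List.slice l none (some (min cri.1 cri.2 + 1)) ++ [[X, Y]] ++
         PySem.List.slice l (some (min cri.1 cri.2 + 1)) none) =
    PySem.List.slice l none
        (some (if min cri.1 cri.2 = 0 ∧ max cri.1 cri.2 = PySem.List.len l - 1 then 0
               else min cri.1 cri.2 + 1)) ++ [[X, Y]] ++
      PySem.List.slice l
        (some (if min cri.1 cri.2 = 0 ∧ max cri.1 cri.2 = PySem.List.len l - 1 then 0
               else min cri.1 cri.2 + 1)) none := by
  split_ifs with h
  · rw [PySem.List.slice_to l (le_refl (0 : Int)), PySem.List.slice_from l (le_refl (0 : Int))]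
    simp
  · rfl

-- heads of A's four sorts, phrased in the canonical pvK/pvLt/pvGt vocabulary
theorem pvGetD0_sorted_K1 (xs : List (List Int)) :
    PySem.List.pyGetD (PySem.List.sorted xs (fun p => PySem.List.pyGetD p 1 0)) 0 [] =
      (xs.foldl (pvBest (fun a b => pvLt (pvK1 a) (pvK1 b))) none).getD [] := by
  rw [pvPyGetD_zero, pvHead_sorted _ xs]; rfl
theorem pvGetD0_sorted_K1_rev (xs : List (List Int)) :
    PySem.List.pyGetD (PySem.List.sorted xs (fun p => PySem.List.pyGetD p 1 0) true) 0 [] =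
      (xs.foldl (pvBest (fun a b => pvGt (pvK1 a) (pvK1 b))) none).getD [] := by
  rw [pvPyGetD_zero, pvHead_sorted_rev _ xs]; rfl
theorem pvGetD0_sorted_K0 (xs : List (List Int)) :
    PySem.List.pyGetD (PySem.List.sorted xs (fun p => PySem.List.pyGetD p 0 0)) 0 [] =
      (xs.foldl (pvBest (fun a b => pvLt (pvK0 a) (pvK0 b))) none).getD [] := by
  rw [pvPyGetD_zero, pvHead_sorted _ xs]; rfl
theorem pvGetD0_sorted_K0_rev (xs : List (List Int)) :
    PySem.List.pyGetD (PySem.List.sorted xs (fun p => PySem.List.pyGetD p 0 0) true) 0 [] =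
      (xs.foldl (pvBest (fun a b => pvGt (pvK0 a) (pvK0 b))) none).getD [] := by
  rw [pvPyGetD_zero, pvHead_sorted_rev _ xs]; rfl

theorem pvGuard_eq {α : Type} (xs : List α) (before : α → α → Bool) :
    (1 ≤ xs.length) = ((xs.foldl (pvBest before) none).isSome = true) := by
  rw [pvIsSome_foldl_pvBest]
  exact propext (pvGuard_iff xs)

-- ===== VERDICT (by name: the statement is the Claim_ definition above) =====
theorem insert_start_spec : Claim_equal_insert_start := by
  intro l X Y _ _
  unfold Spec_insert_start insert_start insert_start_alt
  rw [PySem.List.foldl_pyRange_zero_pyGetD l [] (pvABody X Y) ([], [], [], [])]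
  rw [pvALoop, pvBLoop]
  have hirr1 : ∀ a : Int, pvLt a a = false := by intro a; simp [pvLt]
  have hirr2 : ∀ a : Int, pvGt a a = false := by intro a; simp [pvGt]
  have hlt1 : ∀ a b c : Int, pvLt a b = true → pvLt c b = false → pvLt c a = false := by
    intro a b c h1 h2; simp [pvLt] at *; omega
  have hlt2 : ∀ a b c : Int, pvGt a b = true → pvGt c b = false → pvGt c a = false := by
    intro a b c h1 h2; simp [pvGt] at *; omega
  have r1 := pvMain (pvQ1 X Y) pvK1 pvLt hirr1 hlt1 l
  have r2 := pvMain (pvQ2 X Y) pvK1 pvGt hirr2 hlt2 l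
  have r3 := pvMain (pvQ3 X Y) pvK0 pvLt hirr1 hlt1 l
  have r4 := pvMain (pvQ4 X Y) pvK0 pvGt hirr2 hlt2 l
  simp only [List.nil_append, pvGetD0_sorted_K1, pvGetD0_sorted_K1_rev, pvGetD0_sorted_K0,
    pvGetD0_sorted_K0_rev, PySem.List.length_sorted, ge_iff_le]
  set bv1 := (l.filter (pvQ1 X Y)).foldl (pvBest (fun a b => pvLt (pvK1 a) (pvK1 b))) none with hbv1
  set bv2 := (l.filter (pvQ2 X Y)).foldl (pvBest (fun a b => pvGt (pvK1 a) (pvK1 b))) none with hbv2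
  set bv3 := (l.filter (pvQ3 X Y)).foldl (pvBest (fun a b => pvLt (pvK0 a) (pvK0 b))) none with hbv3
  set bv4 := (l.filter (pvQ4 X Y)).foldl (pvBest (fun a b => pvGt (pvK0 a) (pvK0 b))) none with hbv4
  set bi1 := (PySem.List.enumerate l).foldl (pvUpd (pvQ1 X Y) pvK1 pvLt) none with hbi1
  set bi2 := (PySem.List.enumerate l).foldl (pvUpd (pvQ2 X Y) pvK1 pvGt) none with hbi2
  set bi3 := (PySem.List.enumerate l).foldl (pvUpd (pvQ3 X Y) pvK0 pvLt) none with hbi3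
  set bi4 := (PySem.List.enumerate l).foldl (pvUpd (pvQ4 X Y) pvK0 pvGt) none with hbi4
  have G1 : (1 ≤ (l.filter (pvQ1 X Y)).length) = (bv1.isSome = true) := by
    rw [hbv1]; exact pvGuard_eq _ _
  have G2 : (1 ≤ (l.filter (pvQ2 X Y)).length) = (bv2.isSome = true) := by
    rw [hbv2]; exact pvGuard_eq _ _
  have G3 : (1 ≤ (l.filter (pvQ3 X Y)).length) = (bv3.isSome = true) := by
    rw [hbv3]; exact pvGuard_eq _ _
  have G4 : (1 ≤ (l.filter (pvQ4 X Y)).length) = (bv4.isSome = true) := by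
    rw [hbv4]; exact pvGuard_eq _ _
  simp only [G1, G2, G3, G4]
  clear_value bv1 bv2 bv3 bv4 bi1 bi2 bi3 bi4
  have s1 := pvRel_isSome _ _ _ _ _ _ r1
  have s2 := pvRel_isSome _ _ _ _ _ _ r2
  have s3 := pvRel_isSome _ _ _ _ _ _ r3
  have s4 := pvRel_isSome _ _ _ _ _ _ r4
  by_cases g1 : bv1.isSome = true ∧ bv2.isSome = true
  · obtain ⟨b1, hb1⟩ := Option.isSome_iff_exists.1 g1.1
    obtain ⟨b2, hb2⟩ := Option.isSome_iff_exists.1 g1.2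
    subst hb1 hb2
    obtain ⟨p1, hp1⟩ := Option.isSome_iff_exists.1 s1.symm
    obtain ⟨p2, hp2⟩ := Option.isSome_iff_exists.1 s2.symm
    subst hp1 hp2
    have i1 := pvRel_idx _ _ _ _ _ _ r1
    have i2 := pvRel_idx _ _ _ _ _ _ r2
    simp only [Option.isSome_some, and_self, if_pos, Option.getD_some, i1, i2]
    exact pvFinal l X Y (p1.1, p2.1)
  · have g1' : ¬ (bi1.isSome = true ∧ bi2.isSome = true) := by rw [← s1, ← s2]; exact g1
    by_cases g2 : bv3.isSome = true ∧ bv4.isSome = true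
    · obtain ⟨b3, hb3⟩ := Option.isSome_iff_exists.1 g2.1
      obtain ⟨b4, hb4⟩ := Option.isSome_iff_exists.1 g2.2
      subst hb3 hb4
      obtain ⟨p3, hp3⟩ := Option.isSome_iff_exists.1 s3.symm
      obtain ⟨p4, hp4⟩ := Option.isSome_iff_exists.1 s4.symm
      subst hp3 hp4
      have i3 := pvRel_idx _ _ _ _ _ _ r3
      have i4 := pvRel_idx _ _ _ _ _ _ r4
      simp only [if_neg g1, if_neg g1', Option.isSome_some, and_self, if_pos,
        Option.getD_some, i3, i4]
      exact pvFinal l X Y (p3.1, p4.1)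
    · have g2' : ¬ (bi3.isSome = true ∧ bi4.isSome = true) := by rw [← s3, ← s4]; exact g2
      simp only [if_neg g1, if_neg g1', if_neg g2, if_neg g2']
      exact pvFinal l X Y (-1, -1)
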